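-- pv_equiv track=rewrite | github.com/techqueria/data-structures-and-algorithms | Python/chapter01/1.2 - Check Perm/camilo_sol_1.2.py | perm_check
-- ===== SOURCE A (Python) =====
-- def perm_check(str_1,str_2):
--     if len(str_1) != len(str_2):#If both str are diiferent lenghts return false
--         return False
--     d = {}
--     for i in str_1: #takes all the letter in string one and add them to the hash map
--         if i in d:  #counts the number of letter
--             d[i] += 1
--         else:
--             d[i] = 1
--
--     for j in str_2: #
--         if j in d:#Looks at the letter in the string and subtract the number
--                   #of the same letter from the value
--             d[j] -= 1
--         else:
--             d[j] = 1
--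
--     for keys,value in d.items():
--         if value > 0:
--             return False
--     return True
-- ===== SOURCE B (Python) =====
-- def perm_check(str_1, str_2):
--     return sorted(str_1) == sorted(str_2)
-- ===== Notes on version B (the rewrite author's own statement) =====
-- stated objective: simpler
-- what changed: Replaces the hash-map tally loops and leftover-value scan with a single sort-and-compare: sorted(str_1) == sorted(str_2), the length check being implicit.
import Mathlib
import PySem

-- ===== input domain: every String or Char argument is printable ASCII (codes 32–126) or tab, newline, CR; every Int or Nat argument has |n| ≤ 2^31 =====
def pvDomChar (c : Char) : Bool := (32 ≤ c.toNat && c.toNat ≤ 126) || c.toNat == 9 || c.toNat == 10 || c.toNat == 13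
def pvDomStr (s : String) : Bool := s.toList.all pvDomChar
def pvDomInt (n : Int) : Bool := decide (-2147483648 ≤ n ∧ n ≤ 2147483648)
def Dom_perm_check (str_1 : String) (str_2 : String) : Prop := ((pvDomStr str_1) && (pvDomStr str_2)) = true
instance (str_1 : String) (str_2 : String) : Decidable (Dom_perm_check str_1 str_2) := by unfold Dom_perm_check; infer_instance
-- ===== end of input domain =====

-- B replaces A's two counting loops and leftover-value scan with a single sort-and-compare (simpler; equal return value proved).

-- ===== PORT A =====
def perm_check (str_1 : String) (str_2 : String) : Bool :=
  if PySem.Str.len str_1 ≠ PySem.Str.len str_2 then false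
  else
    let d1 := str_1.toList.foldl
      (fun d i => if d.contains i then d.insert i (d.getD i 0 + 1) else d.insert i 1)
      (PySem.Dict.empty : PySem.Dict Char Int)
    let d2 := str_2.toList.foldl
      (fun d j => if d.contains j then d.insert j (d.getD j 0 - 1) else d.insert j 1)
      d1
    !(d2.items.any (fun kv => decide (kv.2 > (0 : Int))))

-- ===== PORT B =====
def perm_check_alt (str_1 : String) (str_2 : String) : Bool :=
  decide (PySem.List.sorted str_1.toList (fun x => x) false
        = PySem.List.sorted str_2.toList (fun x => x) false)

-- ===== PRECONDITION & SPEC =====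
def Spec_perm_check (str_1 : String) (str_2 : String) (out : Bool) : Prop := out = perm_check_alt str_1 str_2
instance (str_1 : String) (str_2 : String) (out : Bool) : Decidable (Spec_perm_check str_1 str_2 out) := by unfold Spec_perm_check; infer_instance

-- ===== CLAIM (what is proved, stated in full; the proofs are below) =====
def Claim_equal_perm_check : Prop := ∀ (str_1 : String) (str_2 : String), Dom_perm_check str_1 str_2 → Spec_perm_check str_1 str_2 (perm_check str_1 str_2)

-- ===== LEMMAS AND PROOFS =====
theorem loop1_eq_counter (l : List Char) :
    l.foldl (fun (d : PySem.Dict Char Int) i =>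
        if d.contains i then d.insert i (d.getD i 0 + 1) else d.insert i 1)
      PySem.Dict.empty = PySem.Dict.counter l := by
  rw [PySem.List.foldl_congr_mem (g := fun (d : PySem.Dict Char Int) i => d.insert i (d.getD i 0 + 1))]
  · exact PySem.Dict.foldl_insert_getD_add_one_eq_counter l
  · intro d i _
    by_cases h : d.contains i
    · simp [h]
    · have h0 : d.getD i 0 = 0 := PySem.Dict.getD_of_not_contains d (0 : Int) (by simpa using h)
      simp [h, h0]

theorem loop2_getD (l : List Char) (d : PySem.Dict Char Int) (hnd : d.keys.Nodup) (c : Char) :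
    (l.foldl (fun (d : PySem.Dict Char Int) j =>
        if d.contains j then d.insert j (d.getD j 0 - 1) else d.insert j 1) d).getD c 0 =
      if d.contains c then d.getD c 0 - (l.count c : Int)
      else if c ∈ l then 2 - (l.count c : Int)
      else 0 := by
  induction l generalizing d with
  | nil =>
    by_cases h : d.contains c
    · simp [h]
    · simp [h, PySem.Dict.getD_of_not_contains d (0 : Int) (by simpa using h)]
  | cons x t ih =>
    simp only [List.foldl_cons]
    have hstep : (if d.contains x then d.insert x (d.getD x 0 - 1) else d.insert x 1)
        = d.insert x (if d.contains x then d.getD x 0 - 1 else 1) := by split_ifs <;> rfl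
    rw [hstep, ih _ (PySem.Dict.nodup_keys_insert d x _ hnd)]
    rw [PySem.Dict.contains_insert, PySem.Dict.getD_insert]
    by_cases hcx : c = x
    · subst hcx
      by_cases hdc : d.contains c
      · simp [hdc, List.count_cons_self]
        ring
      · simp [hdc, List.count_cons_self, List.mem_cons]
        ring
    · have hne : (c == x) = false := by simp [hcx]
      have hxc : ¬ x = c := fun h => hcx h.symm
      simp only [hne, Bool.false_or, if_neg hcx]
      simp [hxc, List.mem_cons, or_iff_right hcx]

theorem list_sum_count_toFinset (l : List Char) : ∑ c ∈ l.toFinset, l.count c = l.length := by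
  simpa using Multiset.toFinset_sum_count_eq (↑l : Multiset Char)

theorem counts_eq_of_le (l1 l2 : List Char) (hlen : l1.length = l2.length)
    (hle : ∀ c, l1.count c ≤ l2.count c) : l1.Perm l2 := by
  rw [List.perm_iff_count]
  by_contra hne
  obtain ⟨a, ha⟩ := not_forall.mp hne
  have halt : l1.count a < l2.count a := lt_of_le_of_ne (hle a) ha
  have ha2 : a ∈ l2.toFinset := by
    rw [List.mem_toFinset]
    exact List.count_pos_iff.mp (by omega)
  have hsub : l1.toFinset ⊆ l2.toFinset := by
    intro x hx
    rw [List.mem_toFinset] at hx ⊢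
    exact List.count_pos_iff.mp (lt_of_lt_of_le (List.count_pos_iff.mpr hx) (hle x))
  have hsum1 : ∑ c ∈ l2.toFinset, l1.count c = l1.length := by
    rw [← list_sum_count_toFinset l1]
    refine (Finset.sum_subset hsub ?_).symm
    intro x _ hx
    exact List.count_eq_zero_of_not_mem (by simpa [List.mem_toFinset] using hx)
  have hsum2 : ∑ c ∈ l2.toFinset, l2.count c = l2.length := list_sum_count_toFinset l2
  have hstrict : ∑ c ∈ l2.toFinset, l1.count c < ∑ c ∈ l2.toFinset, l2.count c :=
    Finset.sum_lt_sum (fun c _ => hle c) ⟨a, ha2, halt⟩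
  omega

theorem perm_check_eq_alt (s1 s2 : String) : perm_check s1 s2 = perm_check_alt s1 s2 := by
  by_cases hlen : s1.toList.length = s2.toList.length
  · have hc : ¬ (PySem.Str.len s1 ≠ PySem.Str.len s2) := by
      simp [PySem.Str.len_eq, hlen]
    unfold perm_check
    rw [if_neg hc]
    simp only [loop1_eq_counter]
    set l1 := s1.toList with hl1
    set l2 := s2.toList with hl2
    set d2 := l2.foldl
      (fun (d : PySem.Dict Char Int) j =>
        if d.contains j then d.insert j (d.getD j 0 - 1) else d.insert j 1)
      (PySem.Dict.counter l1) with hd2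
    have hgB : (fun (d : PySem.Dict Char Int) j =>
        if d.contains j then d.insert j (d.getD j 0 - 1) else d.insert j 1)
        = fun d j => d.insert j (if d.contains j then d.getD j 0 - 1 else 1) := by
      funext d j; split_ifs <;> rfl
    have hnd2 : d2.keys.Nodup := by
      rw [hd2, hgB]
      exact PySem.Dict.nodup_keys_foldl_insert _ _ _ (PySem.Dict.nodup_keys_counter l1)
    have hkeys : d2.keys = PySem.Set.update (PySem.Set.ofList l1) l2 := by
      rw [hd2, hgB, PySem.Dict.keys_foldl_insert, PySem.Dict.keys_counter]
    have hget : ∀ c, d2.getD c 0 =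
        if l1.contains c then (l1.count c : Int) - (l2.count c : Int)
        else if c ∈ l2 then 2 - (l2.count c : Int)
        else 0 := by
      intro c
      rw [hd2, loop2_getD l2 _ (PySem.Dict.nodup_keys_counter l1) c,
          PySem.Dict.contains_counter, PySem.Dict.getD_counter]
    have hitems : d2.items = d2.keys.map (fun k => (k, d2.getD k 0)) :=
      PySem.Dict.items_eq_map_keys d2 hnd2 0
    have hiff : ((d2.items.any fun kv => decide (kv.2 > (0 : Int))) = false) ↔ l1.Perm l2 := by
      rw [hitems, List.any_map, List.any_eq_false]
      constructor
      · intro h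
        apply counts_eq_of_le l1 l2 hlen
        intro c
        by_cases h1 : c ∈ l1
        · have hk : c ∈ d2.keys := by
            rw [hkeys, PySem.Set.mem_update]
            left; rwa [PySem.Set.mem_ofList]
          have hv := h _ hk
          simp [Function.comp, hget, h1] at hv
          omega
        · simp [List.count_eq_zero_of_not_mem h1]
      · intro hp k hk
        have hcount := (List.perm_iff_count.mp hp) k
        by_cases h1 : k ∈ l1
        · simp [hget, h1, hcount]
        · have h2 : k ∉ l2 := by
            intro h2
            have := List.count_pos_iff.mpr h2
            rw [← hcount] at this
            exact h1 (List.count_pos_iff.mp this)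
          simp [hget, h1, h2]
    unfold perm_check_alt
    by_cases hp : l1.Perm l2
    · rw [hiff.mpr hp, decide_eq_true ((PySem.List.sorted_id_eq_sorted_id_iff_perm l1 l2).mpr hp)]
      rfl
    · have hany : (d2.items.any fun kv => decide (kv.2 > (0 : Int))) = true := by
        cases h : (d2.items.any fun kv => decide (kv.2 > (0 : Int)))
        · exact absurd (hiff.mp h) hp
        · rfl
      rw [hany, decide_eq_false (fun h => hp ((PySem.List.sorted_id_eq_sorted_id_iff_perm l1 l2).mp h))]
      rfl
  · have hA : perm_check s1 s2 = false := by
      unfold perm_check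
      rw [if_pos]
      simp only [PySem.Str.len_eq, ne_eq, Nat.cast_inj]
      exact hlen
    have hB : perm_check_alt s1 s2 = false := by
      apply decide_eq_false
      intro h
      exact hlen ((PySem.List.sorted_id_eq_sorted_id_iff_perm _ _).mp h).length_eq
    rw [hA, hB]

-- ===== VERDICT (by name: the statement is the Claim_ definition above) =====
theorem perm_check_spec : Claim_equal_perm_check := by
  intro s1 s2 _
  exact perm_check_eq_alt s1 s2
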